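-- pv_equiv track=rewrite | github.com/google/adk-python | src/google/adk/utils/instructions_utils.py | _parse_nested_path
-- ===== SOURCE A (Python) =====
-- def _parse_nested_path(var_name: str) -> list[str]:
--   """Parse a nested variable path into individual keys.
--
--   Supports both dot notation (key.subkey) and bracket notation (key['subkey']).
--   Mixed notation is also supported (key.subkey['nested']).
--
--   Args:
--     var_name: The variable name to parse (e.g., "user.profile.name" or "user['profile']['name']")
--
--   Returns:
--     List of keys to traverse the nested structure.
--   """
--   if '.' not in var_name and '[' not in var_name:
--     return [var_name]
--
--   keys = []
--   current_key = ""
--   i = 0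
--
--   while i < len(var_name):
--     char = var_name[i]
--
--     if char == '.':
--       if current_key:
--         keys.append(current_key)
--         current_key = ""
--     elif char == '[':
--       if current_key:
--         keys.append(current_key)
--         current_key = ""
--       bracket_end = var_name.find(']', i)
--       if bracket_end == -1:
--         raise ValueError(f"Unclosed bracket in variable name: {var_name}")
--
--       bracket_content = var_name[i+1:bracket_end]
--       if (bracket_content.startswith('"') and bracket_content.endswith('"')) or \
--          (bracket_content.startswith("'") and bracket_content.endswith("'")):
--         bracket_content = bracket_content[1:-1]
--
--       keys.append(bracket_content)
--       i = bracket_end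
--     else:
--       current_key += char
--
--     i += 1
--
--   if current_key:
--     keys.append(current_key)
--
--   return keys
-- ===== SOURCE B (Python) =====
-- def _parse_nested_path(var_name: str) -> list[str]:
--   """Chunk-based parser: instead of a char-by-char state machine, jump between
--   bracket tokens with str.find and dot-split the plain text in between."""
--   if '.' not in var_name and '[' not in var_name:
--     return [var_name]
--
--   keys = []
--   rest = var_name
--   while True:
--     open_i = rest.find('[')
--     if open_i == -1:
--       keys.extend(p for p in rest.split('.') if p)
--       return keys
--     keys.extend(p for p in rest[:open_i].split('.') if p)
--     close_i = rest.find(']', open_i + 1)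
--     if close_i == -1:
--       raise ValueError(f"Unclosed bracket in variable name: {var_name}")
--     content = rest[open_i + 1:close_i]
--     if content and content[0] == content[-1] and content[0] in ('"', "'"):
--       content = content[1:-1]
--     keys.append(content)
--     rest = rest[close_i + 1:]
-- ===== Notes on version B (the rewrite author's own statement) =====
-- stated objective: alternative
-- what changed: Replaced the character-by-character state machine (index loop with a current-key accumulator) by a chunk-based tokenizer that jumps between bracket tokens with str.find and dot-splits the plain text in between with str.split.
import Mathlib
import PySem

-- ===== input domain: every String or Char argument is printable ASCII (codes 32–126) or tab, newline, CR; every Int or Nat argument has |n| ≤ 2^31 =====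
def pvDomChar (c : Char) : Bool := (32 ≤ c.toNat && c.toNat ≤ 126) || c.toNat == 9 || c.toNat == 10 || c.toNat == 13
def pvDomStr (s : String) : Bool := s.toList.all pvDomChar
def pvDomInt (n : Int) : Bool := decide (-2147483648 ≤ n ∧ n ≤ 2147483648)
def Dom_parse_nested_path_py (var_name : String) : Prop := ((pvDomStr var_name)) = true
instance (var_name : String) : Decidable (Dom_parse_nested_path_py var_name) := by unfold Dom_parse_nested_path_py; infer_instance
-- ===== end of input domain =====

-- B replaces A's character-by-character state machine by a chunk-based tokenizer
-- (find the next '[…]' token, dot-split the plain text in between); same results.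
-- A raises ValueError on an unclosed '['; B raises the same error there; Pre_ excludes those inputs.

-- ===== PORT A =====

-- bracket_content[1:-1]: drop the first and last character (exact for every list:
-- slice [1:-1] of a list of length ≤ 1 is empty, as is tail.dropLast).
-- startswith('"') for a one-char prefix is exactly head? = '"'; endswith is getLast?.
def pvAStrip (bc : List Char) : List Char :=
  if (bc.head? = some '"' ∧ bc.getLast? = some '"') ∨
     (bc.head? = some '\'' ∧ bc.getLast? = some '\'') then bc.tail.dropLast else bc

-- `if current_key: keys.append(current_key)` — appended only when non-empty.
def pvAFlush (cur : List Char) : List String :=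
  if cur = [] then [] else [String.ofList cur]

-- A's while loop over `var_name`, transliterated structurally: the remaining suffix
-- of the string replaces the index i.  `var_name.find(']', i)` (with var_name[i] = '[')
-- is the first ']' in the remaining tail: dropWhile (· ≠ ']') finds it;
-- var_name[i+1:bracket_end] is takeWhile (· ≠ ']'); `i = bracket_end; i += 1`
-- resumes right after that ']'.  `none` = the ValueError.
def pvALoop : List Char → List Char → List String → Option (List String)
  | [], cur, keys => some (keys ++ pvAFlush cur)
  | c :: cs, cur, keys =>
    if c = '.' then pvALoop cs [] (keys ++ pvAFlush cur)
    else if c = '[' then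
      if (cs.dropWhile (· ≠ ']')).isEmpty then none
      else pvALoop (cs.dropWhile (· ≠ ']')).tail []
             (keys ++ pvAFlush cur ++ [String.ofList (pvAStrip (cs.takeWhile (· ≠ ']')))])
    else pvALoop cs (cur ++ [c]) keys
termination_by l _ _ => l.length
decreasing_by
  all_goals first
    | (simp; omega)
    | (have h1 : ((cs.dropWhile (· ≠ ']')).tail).length = (cs.dropWhile (· ≠ ']')).length - 1 :=
         List.length_tail
       have h2 : (cs.dropWhile (· ≠ ']')).length ≤ cs.length := List.length_dropWhile_le _ cs
       simp only [List.length_cons]; omega)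

-- `'.' not in var_name and '[' not in var_name`: single-character substring test
-- = character membership (exact).
def parse_nested_path_py (var_name : String) : List String :=
  if var_name.toList.contains '.' = false ∧ var_name.toList.contains '[' = false then
    [var_name]
  else
    (pvALoop var_name.toList [] []).getD []

-- ===== PORT B =====

-- content and content[0] == content[-1] and content[0] in ('"', "'")
def pvBStrip (bc : List Char) : List Char :=
  if bc ≠ [] ∧ bc.head? = bc.getLast? ∧ (bc.head? = some '"' ∨ bc.head? = some '\'') then
    bc.tail.dropLast
  else bc

-- rest.split('.') for the one-character separator, transliterated (exact: same
-- pieces in the same order, the empty string splitting to ['']).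
def pvSplitDot : List Char → List (List Char)
  | [] => [[]]
  | c :: cs =>
    if c = '.' then [] :: pvSplitDot cs
    else
      match pvSplitDot cs with
      | [] => [[c]]            -- unreachable: pvSplitDot never returns []
      | g :: gs => (c :: g) :: gs

-- [p for p in chunk.split('.') if p]
def pvDotKeys (l : List Char) : List String :=
  ((pvSplitDot l).filter (fun g => !g.isEmpty)).map String.ofList

-- B's while loop: rest.find('[') = -1 iff dropWhile (· ≠ '[') rest = [];
-- rest[:open_i] is takeWhile (· ≠ '['); rest.find(']', open_i+1) searches the part
-- after the '[' (dropWhile (· ≠ ']')); content is its takeWhile, rest resumes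
-- after the ']'.  `none` = the ValueError.
def pvBLoop (rest : List Char) (keys : List String) : Option (List String) :=
  if (rest.dropWhile (· ≠ '[')).isEmpty then
    some (keys ++ pvDotKeys (rest.takeWhile (· ≠ '[')))
  else
    if (((rest.dropWhile (· ≠ '[')).tail).dropWhile (· ≠ ']')).isEmpty then none
    else pvBLoop ((((rest.dropWhile (· ≠ '[')).tail).dropWhile (· ≠ ']')).tail)
           (keys ++ pvDotKeys (rest.takeWhile (· ≠ '[')) ++
            [String.ofList (pvBStrip (((rest.dropWhile (· ≠ '[')).tail).takeWhile (· ≠ ']')))])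
termination_by rest.length
decreasing_by
  have h0 : ¬ (rest.dropWhile (· ≠ '[')).isEmpty = true := by assumption
  have h1 : (rest.dropWhile (· ≠ '[')).length ≤ rest.length := List.length_dropWhile_le _ rest
  have h2 : ((((rest.dropWhile (· ≠ '[')).tail).dropWhile (· ≠ ']')).tail).length =
      ((((rest.dropWhile (· ≠ '[')).tail).dropWhile (· ≠ ']'))).length - 1 := List.length_tail
  have h3 : (((rest.dropWhile (· ≠ '[')).tail).dropWhile (· ≠ ']')).length ≤
      ((rest.dropWhile (· ≠ '[')).tail).length := List.length_dropWhile_le _ _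
  have h4 : ((rest.dropWhile (· ≠ '[')).tail).length = (rest.dropWhile (· ≠ '[')).length - 1 :=
    List.length_tail
  have h5 : (rest.dropWhile (· ≠ '[')).length ≠ 0 := by
    intro hh
    exact h0 (List.isEmpty_iff.mpr (List.length_eq_zero_iff.mp hh))
  omega

def parse_nested_path_py_alt (var_name : String) : List String :=
  if var_name.toList.contains '.' = false ∧ var_name.toList.contains '[' = false then
    [var_name]
  else
    (pvBLoop var_name.toList []).getD []

-- ===== PRECONDITION & SPEC =====

-- A raises ValueError ("Unclosed bracket") exactly when some '[' has no ']' at or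
-- after it; B raises the same error there.  Pre_ excludes exactly those inputs.
def Pre_parse_nested_path_py (var_name : String) : Prop :=
  ∀ i ∈ List.range var_name.toList.length,
    var_name.toList[i]? = some '[' → ']' ∈ var_name.toList.drop i
instance (var_name : String) : Decidable (Pre_parse_nested_path_py var_name) := by
  unfold Pre_parse_nested_path_py; infer_instance

def pvWitness_parse_nested_path_py : String := "a.b['c']"

def Spec_parse_nested_path_py (var_name : String) (out : List String) : Prop := out = parse_nested_path_py_alt var_name
instance (var_name : String) (out : List String) : Decidable (Spec_parse_nested_path_py var_name out) := by unfold Spec_parse_nested_path_py; infer_instance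

-- ===== CLAIM (what is proved, stated in full; the proofs are below) =====
def Claim_equal_parse_nested_path_py : Prop := ∀ (var_name : String), Dom_parse_nested_path_py var_name → Pre_parse_nested_path_py var_name → Spec_parse_nested_path_py var_name (parse_nested_path_py var_name)

-- ===== LEMMAS AND PROOFS =====

lemma pv_strip_eq (l : List Char) : pvAStrip l = pvBStrip l := by
  have hiff :
      ((l.head? = some '"' ∧ l.getLast? = some '"') ∨
       (l.head? = some '\'' ∧ l.getLast? = some '\'')) ↔
      (l ≠ [] ∧ l.head? = l.getLast? ∧ (l.head? = some '"' ∨ l.head? = some '\'')) := by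
    constructor
    · rintro (⟨ha, hb⟩ | ⟨ha, hb⟩) <;>
        exact ⟨by rintro rfl; simp at ha, by rw [ha, hb], by simp [ha]⟩
    · rintro ⟨hne, heq, ha | ha⟩
      · exact Or.inl ⟨ha, heq ▸ ha⟩
      · exact Or.inr ⟨ha, heq ▸ ha⟩
  unfold pvAStrip pvBStrip
  split_ifs with h1 h2 h2 <;> first
    | rfl
    | (exact absurd (hiff.mp h1) h2)
    | (exact absurd (hiff.mpr h2) h1)

lemma pv_takeWhile_append_all {p : Char → Bool} {pre l : List Char}
    (h : ∀ x ∈ pre, p x = true) : (pre ++ l).takeWhile p = pre ++ l.takeWhile p := by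
  induction pre with
  | nil => rfl
  | cons a t ih =>
      have ha := h a (by simp)
      simp [ha, ih (fun x hx => h x (by simp [hx]))]

lemma pv_dropWhile_append_all {p : Char → Bool} {pre l : List Char}
    (h : ∀ x ∈ pre, p x = true) : (pre ++ l).dropWhile p = l.dropWhile p := by
  induction pre with
  | nil => rfl
  | cons a t ih =>
      have ha := h a (by simp)
      simp [ha, ih (fun x hx => h x (by simp [hx]))]

lemma pv_splitDot_no_dot {l : List Char} (h : '.' ∉ l) : pvSplitDot l = [l] := by
  induction l with
  | nil => rfl
  | cons a t ih =>
      have ha : a ≠ '.' := fun hh => h (by simp [hh])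
      simp only [pvSplitDot, if_neg ha, ih (fun hh => h (by simp [hh]))]

lemma pv_splitDot_append_dot {pre : List Char} (rest : List Char) (h : '.' ∉ pre) :
    pvSplitDot (pre ++ '.' :: rest) = pre :: pvSplitDot rest := by
  induction pre with
  | nil => simp [pvSplitDot]
  | cons a t ih =>
      have ha : a ≠ '.' := fun hh => h (by simp [hh])
      simp only [List.cons_append, pvSplitDot, if_neg ha,
        ih (fun hh => h (by simp [hh]))]

lemma pv_dotKeys_no_dot {l : List Char} (h : '.' ∉ l) : pvDotKeys l = pvAFlush l := by
  unfold pvDotKeys pvAFlush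
  rw [pv_splitDot_no_dot h]
  by_cases hl : l = [] <;> simp [hl]

lemma pv_dotKeys_append_dot {pre : List Char} (rest : List Char) (h : '.' ∉ pre) :
    pvDotKeys (pre ++ '.' :: rest) = pvAFlush pre ++ pvDotKeys rest := by
  unfold pvDotKeys pvAFlush
  rw [pv_splitDot_append_dot rest h]
  by_cases hl : pre = [] <;> simp [hl]

lemma pv_dropWhile_head {p : Char → Bool} {l : List Char} {x : Char} {r : List Char}
    (h : l.dropWhile p = x :: r) :
    p x = false := by
  induction l with
  | nil => simp at h
  | cons a t ih =>
      by_cases ha : p a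
      · rw [List.dropWhile_cons_of_pos ha] at h; exact ih h
      · rw [List.dropWhile_cons_of_neg ha] at h
        cases h; simpa using ha

lemma pv_bloop_no_bracket {l : List Char} (keys : List String) (h : '[' ∉ l) :
    pvBLoop l keys = some (keys ++ pvDotKeys l) := by
  have hd : l.dropWhile (· ≠ '[') = [] :=
    List.dropWhile_eq_nil_iff.mpr
      (fun x hx => by simpa using fun (e : x = '[') => h (e ▸ hx))
  have ht : l.takeWhile (· ≠ '[') = l := by
    conv_rhs => rw [← List.takeWhile_append_dropWhile (p := (· ≠ '[')) (l := l), hd]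
    rw [List.append_nil]
  rw [pvBLoop, hd, ht]
  simp

lemma pv_bloop_bracket {pre : List Char} (after : List Char) (keys : List String)
    (h : '[' ∉ pre) :
    pvBLoop (pre ++ '[' :: after) keys =
      if (after.dropWhile (· ≠ ']')).isEmpty then none
      else pvBLoop ((after.dropWhile (· ≠ ']')).tail)
             (keys ++ pvDotKeys pre ++
              [String.ofList (pvBStrip (after.takeWhile (· ≠ ']')))]) := by
  have hall : ∀ x ∈ pre, ((x ≠ '[' : Bool)) = true :=
    fun x hx => by simpa using fun (e : x = '[') => h (e ▸ hx)
  have hd : (pre ++ '[' :: after).dropWhile (· ≠ '[') = '[' :: after := by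
    rw [pv_dropWhile_append_all hall]; simp
  have ht : (pre ++ '[' :: after).takeWhile (· ≠ '[') = pre := by
    rw [pv_takeWhile_append_all hall]; simp
  rw [pvBLoop, hd, ht]
  simp

lemma pv_bloop_dot {pre : List Char} (cs : List Char) (keys : List String)
    (hd : '.' ∉ pre) (hb : '[' ∉ pre) :
    pvBLoop (pre ++ '.' :: cs) keys = pvBLoop cs (keys ++ pvAFlush pre) := by
  rcases hdw : cs.dropWhile (· ≠ '[') with _ | ⟨x, after⟩
  · have hcs : '[' ∉ cs := by
      intro hx
      have hall := List.dropWhile_eq_nil_iff.mp hdw _ hx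
      simp at hall
    have hfull : '[' ∉ pre ++ '.' :: cs := by
      intro hx; rcases List.mem_append.mp hx with h | h
      · exact hb h
      · rcases List.mem_cons.mp h with h | h
        · exact absurd h.symm (by decide)
        · exact hcs h
    rw [pv_bloop_no_bracket _ hfull, pv_bloop_no_bracket _ hcs,
      pv_dotKeys_append_dot cs hd]
    simp
  · have hx : x = '[' := by
      have := pv_dropWhile_head hdw; simpa using this
    subst hx
    have hsplit : cs = cs.takeWhile (· ≠ '[') ++ '[' :: after := by
      conv_lhs => rw [← List.takeWhile_append_dropWhile (p := (· ≠ '[')) (l := cs)]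
      rw [hdw]
    have htw : '[' ∉ cs.takeWhile (· ≠ '[') := by
      intro hx
      have := List.mem_takeWhile_imp hx; simp at this
    have hpre' : '[' ∉ pre ++ '.' :: cs.takeWhile (· ≠ '[') := by
      intro hx; rcases List.mem_append.mp hx with h | h
      · exact hb h
      · rcases List.mem_cons.mp h with h | h
        · exact absurd h.symm (by decide)
        · exact htw h
    calc pvBLoop (pre ++ '.' :: cs) keys
        = pvBLoop ((pre ++ '.' :: cs.takeWhile (· ≠ '[')) ++ '[' :: after) keys := by
          rw [List.append_assoc, List.cons_append, ← hsplit]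
      _ = pvBLoop (cs.takeWhile (· ≠ '[') ++ '[' :: after) (keys ++ pvAFlush pre) := by
          rw [pv_bloop_bracket after keys hpre', pv_bloop_bracket after _ htw,
            pv_dotKeys_append_dot _ hd]
          by_cases he : (after.dropWhile (· ≠ ']')).isEmpty
          · rw [if_pos he, if_pos he]
          · rw [if_neg he, if_neg he]; simp
      _ = pvBLoop cs (keys ++ pvAFlush pre) := by rw [← hsplit]

lemma pv_loop_eq : ∀ (n : Nat) (cs cur : List Char) (keys : List String),
    cs.length ≤ n → '.' ∉ cur → '[' ∉ cur →
    pvALoop cs cur keys = pvBLoop (cur ++ cs) keys := by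
  intro n
  induction n with
  | zero =>
      intro cs cur keys hn hd hb
      have : cs = [] := List.length_eq_zero_iff.mp (Nat.le_zero.mp hn)
      subst this
      rw [pvALoop, List.append_nil, pv_bloop_no_bracket _ hb, pv_dotKeys_no_dot hd]
  | succ m ih =>
      intro cs cur keys hn hd hb
      rcases cs with _ | ⟨c, cs'⟩
      · rw [pvALoop, List.append_nil, pv_bloop_no_bracket _ hb, pv_dotKeys_no_dot hd]
      · by_cases hc : c = '.'
        · subst hc
          rw [pvALoop, if_pos rfl, pv_bloop_dot cs' keys hd hb,
            ih cs' [] _ (by simpa using Nat.lt_succ_iff.mp (by simpa using hn))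
              (by simp) (by simp)]
          simp
        · by_cases hcb : c = '['
          · subst hcb
            rw [pvALoop, if_neg (by decide), if_pos rfl,
              pv_bloop_bracket cs' keys hb]
            by_cases he : (cs'.dropWhile (· ≠ ']')).isEmpty
            · rw [if_pos he, if_pos he]
            · rw [if_neg he, if_neg he]
              have hlen : ((cs'.dropWhile (· ≠ ']')).tail).length ≤ m := by
                have h1 : (cs'.dropWhile (· ≠ ']')).length ≤ cs'.length :=
                  List.length_dropWhile_le _ cs'
                have h2 : ((cs'.dropWhile (· ≠ ']')).tail).length =
                    (cs'.dropWhile (· ≠ ']')).length - 1 := List.length_tail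
                simp at hn; omega
              rw [ih ((cs'.dropWhile (· ≠ ']')).tail) [] _ hlen (by simp) (by simp)]
              simp [pv_dotKeys_no_dot hd, pv_strip_eq]
          · rw [pvALoop, if_neg hc, if_neg hcb,
              ih cs' (cur ++ [c]) keys (by simp at hn ⊢; omega)
                (by simp [hd, Ne.symm hc]) (by simp [hb, Ne.symm hcb])]
            simp

-- ===== VERDICT (by name: the statement is the Claim_ definition above) =====
theorem parse_nested_path_py_spec : Claim_equal_parse_nested_path_py := by
  intro var_name _ _
  unfold Spec_parse_nested_path_py parse_nested_path_py parse_nested_path_py_alt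
  by_cases hg : var_name.toList.contains '.' = false ∧ var_name.toList.contains '[' = false
  · rw [if_pos hg, if_pos hg]
  · rw [if_neg hg, if_neg hg,
      pv_loop_eq var_name.toList.length var_name.toList [] [] le_rfl (by simp) (by simp)]
    rfl
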